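-- pv_equiv track=rewrite | github.com/theangrybagel/theangrybagel.github.io | SpaceMarket/Lib.py | GetHTMLStars
-- ===== SOURCE A (Python) =====
-- def GetHTMLStars(stars):
-- 	txt = ""
-- 	for x in range(5):
-- 		chk = " checked"
-- 		if x > stars-1:
-- 			chk = ""
-- 		txt += "<span class=\"fa fa-star{}\"></span>".format(chk)
-- 	return txt
-- ===== SOURCE B (Python) =====
-- def GetHTMLStars(stars):
--     n = max(0, min(5, stars))
--     return ('<span class="fa fa-star checked"></span>' * n
--             + '<span class="fa fa-star"></span>' * (5 - n))
-- ===== Notes on version B (the rewrite author's own statement) =====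
-- stated objective: simpler
-- what changed: Replaces the per-star branch-and-append loop by a clamped checked-star count and two multiplied string blocks.
import Mathlib
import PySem

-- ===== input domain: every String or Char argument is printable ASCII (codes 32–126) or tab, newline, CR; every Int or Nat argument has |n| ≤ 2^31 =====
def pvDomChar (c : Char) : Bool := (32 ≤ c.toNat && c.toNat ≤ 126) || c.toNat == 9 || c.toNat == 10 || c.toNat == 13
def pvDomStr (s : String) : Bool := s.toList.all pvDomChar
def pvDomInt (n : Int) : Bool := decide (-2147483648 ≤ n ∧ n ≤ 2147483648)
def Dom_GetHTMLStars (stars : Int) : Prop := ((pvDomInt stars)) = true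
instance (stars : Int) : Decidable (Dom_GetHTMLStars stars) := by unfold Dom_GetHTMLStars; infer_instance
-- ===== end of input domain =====

set_option maxRecDepth 20000


-- B replaces A's per-star append loop by a clamped checked-count and two repeated blocks (simpler decomposition; return value only).
-- ===== PORT A =====
-- A: a loop appending a checked or unchecked star span each iteration
def GetHTMLStars (stars : Int) : String :=
  (List.range 5).foldl (fun txt x =>
    let chk := if (x : Int) > stars - 1 then "" else " checked"
    txt ++ "<span class=\"fa fa-star" ++ chk ++ "\"></span>") ""

-- ===== PORT B =====
-- B: clamp the checked-star count once, then concatenate two repeated blocks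
def GetHTMLStars_alt (stars : Int) : String :=
  let n := max 0 (min 5 stars)
  String.join (List.replicate n.toNat "<span class=\"fa fa-star checked\"></span>")
    ++ String.join (List.replicate (5 - n).toNat "<span class=\"fa fa-star\"></span>")

-- ===== PRECONDITION & SPEC =====
def Spec_GetHTMLStars (stars : Int) (out : String) : Prop := out = GetHTMLStars_alt stars
instance (stars : Int) (out : String) : Decidable (Spec_GetHTMLStars stars out) := by unfold Spec_GetHTMLStars; infer_instance

-- ===== CLAIM (what is proved, stated in full; the proofs are below) =====
def Claim_equal_GetHTMLStars : Prop := ∀ (stars : Int), Dom_GetHTMLStars stars → Spec_GetHTMLStars stars (GetHTMLStars stars)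

-- ===== LEMMAS AND PROOFS =====

-- ===== VERDICT (by name: the statement is the Claim_ definition above) =====
theorem GetHTMLStars_spec : Claim_equal_GetHTMLStars := by
  intro stars _
  unfold Spec_GetHTMLStars
  rcases le_or_gt stars 0 with h | h
  · simp [GetHTMLStars, GetHTMLStars_alt, List.range_succ, h, show stars ≤ 1 by omega, show stars ≤ 2 by omega,
      show stars ≤ 3 by omega, show stars ≤ 4 by omega]
    rfl
  · rcases le_or_gt 5 stars with h5 | h5
    · simp [GetHTMLStars, GetHTMLStars_alt, show max 0 (min 5 stars) = 5 by omega,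
        List.range_succ, show ¬ stars ≤ 0 by omega, show ¬ stars ≤ 1 by omega,
        show ¬ stars ≤ 2 by omega, show ¬ stars ≤ 3 by omega, show ¬ stars ≤ 4 by omega]
      rfl
    · interval_cases stars <;> decide
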